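-- pv_equiv track=rewrite | github.com/wfar/NBA_Stats_Bot | NBA_Stats_Bot/nba_stat_scraper_2.py | sort_stats
-- ===== SOURCE A (Python) =====
-- def sort_stats(p1, p2, p3):
--     # Sorts all of player stats from lists into dictionary.
--     value_p1 = ['G', 'G', 'PTS', 'PTS', 'TRB', 'TRB', 'AST', 'AST', 'WS', 'WS' ]
--     value_p2 = ['FG%', 'FG%', 'FG3%', 'FG3%', 'FT%', 'FT%', 'eFG%', 'eFG%'  ]
--     value_p3 = ['PER', 'PER', 'WS', 'WS' ]
--
--     current_dict = {}
--     career_dict = {}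
--
--     loc = 0
--     for x,y in zip(p1, value_p1):
--         if loc == 0:
--             current_dict[y] = x
--             loc += 1
--         else:
--             career_dict[y] = x
--             loc -= 1
--     for x,y in zip(p2, value_p2):
--         if loc == 0:
--             current_dict[y] = x
--             loc += 1
--         else:
--             career_dict[y] = x
--             loc -= 1
--     for x,y in zip(p3, value_p3):
--         if loc == 0:
--             current_dict[y] = x
--             loc += 1
--         else:
--             career_dict[y] = x
--             loc -= 1
--
--     return current_dict, career_dict
-- ===== SOURCE B (Python) =====
-- def split2(pairs):
--     # splits a list into its elements at even and at odd positions
--     if not pairs: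
--         return [], []
--     if len(pairs) == 1:
--         return [pairs[0]], []
--     evens, odds = split2(pairs[2:])
--     return [pairs[0]] + evens, [pairs[1]] + odds
--
--
-- def sort_stats(p1, p2, p3):
--     value_p1 = ['G', 'G', 'PTS', 'PTS', 'TRB', 'TRB', 'AST', 'AST', 'WS', 'WS']
--     value_p2 = ['FG%', 'FG%', 'FG3%', 'FG3%', 'FT%', 'FT%', 'eFG%', 'eFG%']
--     value_p3 = ['PER', 'PER', 'WS', 'WS']
--     combined = (list(zip(value_p1, p1))
--                 + list(zip(value_p2, p2))
--                 + list(zip(value_p3, p3)))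
--     evens, odds = split2(combined)
--     return dict(evens), dict(odds)
-- ===== Notes on version B (the rewrite author's own statement) =====
-- stated objective: alternative
-- what changed: A threads a 0/1 toggle flag through three conditional loops to route each (stat,label) pair; B builds one combined label/stat pair list, splits it into even- and odd-position halves by structural two-at-a-time recursion, and builds the two dicts from those halves directly, with no flag and no per-element branch.
import Mathlib
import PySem

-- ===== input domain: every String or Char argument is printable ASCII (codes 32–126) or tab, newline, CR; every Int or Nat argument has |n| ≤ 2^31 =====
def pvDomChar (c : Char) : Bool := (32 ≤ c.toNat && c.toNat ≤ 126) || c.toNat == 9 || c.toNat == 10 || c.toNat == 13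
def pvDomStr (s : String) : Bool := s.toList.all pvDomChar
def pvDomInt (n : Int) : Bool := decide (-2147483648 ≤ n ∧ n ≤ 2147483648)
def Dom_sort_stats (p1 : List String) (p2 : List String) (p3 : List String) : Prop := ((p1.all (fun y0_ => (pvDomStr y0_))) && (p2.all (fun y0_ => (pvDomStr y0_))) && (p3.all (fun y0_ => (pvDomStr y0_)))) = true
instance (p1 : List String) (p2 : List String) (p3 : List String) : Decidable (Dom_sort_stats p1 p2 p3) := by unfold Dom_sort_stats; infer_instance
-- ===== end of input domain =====

-- B replaces A's 0/1 toggle flag and per-element branch by splitting one combined pair list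
-- into even- and odd-position halves (two-at-a-time recursion); alternative decomposition, same cost.


-- ===== PORT A =====
-- one body of A's three identical loops: dict[y] = x routed by the toggle loc
def pvStepA (st : PySem.Dict String String × PySem.Dict String String × Int)
    (xy : String × String) : PySem.Dict String String × PySem.Dict String String × Int :=
  if st.2.2 = 0 then (st.1.insert xy.2 xy.1, st.2.1, st.2.2 + 1)
  else (st.1, st.2.1.insert xy.2 xy.1, st.2.2 - 1)

def sort_stats (p1 : List String) (p2 : List String) (p3 : List String) :
    (List (String × String)) × (List (String × String)) :=
  let value_p1 := ["G", "G", "PTS", "PTS", "TRB", "TRB", "AST", "AST", "WS", "WS"]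
  let value_p2 := ["FG%", "FG%", "FG3%", "FG3%", "FT%", "FT%", "eFG%", "eFG%"]
  let value_p3 := ["PER", "PER", "WS", "WS"]
  let st0 := (PySem.Dict.empty (κ := String) (ν := String), PySem.Dict.empty (κ := String) (ν := String), (0 : Int))
  let st1 := (p1.zip value_p1).foldl pvStepA st0
  let st2 := (p2.zip value_p2).foldl pvStepA st1
  let st3 := (p3.zip value_p3).foldl pvStepA st2
  (st3.1.items, st3.2.1.items)

-- ===== PORT B =====
-- Source B's split2: elements at even positions and at odd positions, two at a time
def pvSplit2 : List (String × String) → List (String × String) × List (String × String)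
  | [] => ([], [])
  | [a] => ([a], [])
  | a :: b :: t =>
    let (evens, odds) := pvSplit2 t
    (a :: evens, b :: odds)

def sort_stats_alt (p1 : List String) (p2 : List String) (p3 : List String) :
    (List (String × String)) × (List (String × String)) :=
  let value_p1 := ["G", "G", "PTS", "PTS", "TRB", "TRB", "AST", "AST", "WS", "WS"]
  let value_p2 := ["FG%", "FG%", "FG3%", "FG3%", "FT%", "FT%", "eFG%", "eFG%"]
  let value_p3 := ["PER", "PER", "WS", "WS"]
  let combined := value_p1.zip p1 ++ value_p2.zip p2 ++ value_p3.zip p3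
  let (evens, odds) := pvSplit2 combined
  ((PySem.Dict.ofList evens).items, (PySem.Dict.ofList odds).items)

-- ===== PRECONDITION & SPEC =====
def Spec_sort_stats (p1 : List String) (p2 : List String) (p3 : List String) (out : (List (String × String)) × (List (String × String))) : Prop := out = sort_stats_alt p1 p2 p3
instance (p1 : List String) (p2 : List String) (p3 : List String) (out : (List (String × String)) × (List (String × String))) : Decidable (Spec_sort_stats p1 p2 p3 out) := by unfold Spec_sort_stats; infer_instance

-- ===== CLAIM (what is proved, stated in full; the proofs are below) =====
def Claim_equal_sort_stats : Prop := ∀ (p1 : List String) (p2 : List String) (p3 : List String), Dom_sort_stats p1 p2 p3 → Spec_sort_stats p1 p2 p3 (sort_stats p1 p2 p3)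

-- ===== LEMMAS AND PROOFS =====

-- one-step even/odd position split, for the loop invariant
mutual
def pvEvens : List (String × String) → List (String × String)
  | [] => []
  | a :: t => a :: pvOdds t
def pvOdds : List (String × String) → List (String × String)
  | [] => []
  | _ :: t => pvEvens t
end

lemma pvSplit2_eq : ∀ l, pvSplit2 l = (pvEvens l, pvOdds l) := by
  intro l
  induction l using pvSplit2.induct with
  | case1 => rfl
  | case2 a => rfl
  | case3 a b t e o heq ih =>
    simp [pvSplit2, pvEvens, pvOdds, ih]

-- the toggle's final value after n steps
def pvLoc (n : Nat) (loc : Int) : Int := if n % 2 = 0 then loc else 1 - loc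

-- A's loop starting at loc = 0 distributes even positions to current and odd to career
-- (and swapped when starting at loc = 1); keys/values are the swap of A's zip pairs
lemma pvLoopA : ∀ (l : List (String × String)) (cur car : PySem.Dict String String),
    (l.foldl pvStepA (cur, car, (0 : Int)) =
      (cur.update (pvEvens (l.map Prod.swap)), car.update (pvOdds (l.map Prod.swap)), pvLoc l.length 0))
  ∧ (l.foldl pvStepA (cur, car, (1 : Int)) =
      (cur.update (pvOdds (l.map Prod.swap)), car.update (pvEvens (l.map Prod.swap)), pvLoc l.length 1)) := by
  intro l
  induction l with
  | nil => intro cur car; constructor <;> rfl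
  | cons p t ih =>
    intro cur car
    obtain ⟨x, y⟩ := p
    constructor
    · have h := (ih (cur.insert y x) car).2
      simp [List.foldl_cons, pvStepA, h, pvEvens, pvOdds, PySem.Dict.update, pvLoc]
      omega
    · have h := (ih cur (car.insert y x)).1
      simp [List.foldl_cons, pvStepA, h, pvEvens, pvOdds, PySem.Dict.update, pvLoc]
      omega

-- ===== VERDICT (by name: the statement is the Claim_ definition above) =====
theorem sort_stats_spec : Claim_equal_sort_stats := by
  intro p1 p2 p3 _
  unfold Spec_sort_stats sort_stats sort_stats_alt
  dsimp only
  rw [pvSplit2_eq, ← List.foldl_append, ← List.foldl_append,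
      (pvLoopA _ PySem.Dict.empty PySem.Dict.empty).1]
  simp [PySem.Dict.ofList, List.map_append, List.zip_swap]
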